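-- pv_equiv track=rewrite | github.com/ikantkode/pdfLLM | app/converters/pdf_converter.py | detect_table
-- ===== SOURCE A (Python) =====
-- def detect_table(text):
--     """Detect and structure table-like data from text"""
--     lines = text.split('\n')
--     table_data = []
--     headers = None
--     for line in lines:
--         # Split on spaces, but preserve multi-word names
--         cells = [cell.strip() for cell in line.split('  ') if cell.strip()]
--         if not cells:
--             continue
--         if not headers and len(cells) >= 4:  # Assume headers if row has multiple columns
--             headers = cells
--             table_data.append(headers)
--         elif headers and len(cells) >= len(headers) - 1:  # Allow for slightly irregular rows
--             table_data.append(cells[:len(headers)])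
--     return table_data, headers
-- ===== SOURCE B (Python) =====
-- def detect_table(text):
--     """Detect and structure table-like data from text"""
--     # Pass 1: parse every line into its non-empty stripped cells
--     parsed = []
--     for line in text.split('\n'):
--         cells = [c.strip() for c in line.split('  ') if c.strip()]
--         if cells:
--             parsed.append(cells)
--     # Pass 2: locate the header = first parsed row with at least 4 cells
--     idx = next((i for i, c in enumerate(parsed) if len(c) >= 4), None)
--     if idx is None:
--         return [], None
--     headers = parsed[idx]
--     # Pass 3: collect sufficiently wide rows after the header, truncated
--     table = [headers] + [c[:len(headers)] for c in parsed[idx + 1:]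
--                          if len(c) >= len(headers) - 1]
--     return table, headers
-- ===== Notes on version B (the rewrite author's own statement) =====
-- stated objective: alternative
-- what changed: Replaced A's single flag-driven loop by three separate passes: parse all lines into cell lists, locate the first row with >=4 cells as the header, then collect/truncate the rows after it.
import Mathlib
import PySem

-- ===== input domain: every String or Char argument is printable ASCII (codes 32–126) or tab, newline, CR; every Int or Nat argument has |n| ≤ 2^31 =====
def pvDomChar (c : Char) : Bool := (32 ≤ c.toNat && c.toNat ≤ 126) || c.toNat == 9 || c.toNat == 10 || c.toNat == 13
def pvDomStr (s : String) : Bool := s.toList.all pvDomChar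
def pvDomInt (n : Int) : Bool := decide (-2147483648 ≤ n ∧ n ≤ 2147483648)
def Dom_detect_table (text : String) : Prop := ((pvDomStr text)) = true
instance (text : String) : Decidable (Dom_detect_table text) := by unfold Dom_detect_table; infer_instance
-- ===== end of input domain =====

-- B replaces A's single flag-driven loop by three passes (parse lines, locate the header, collect the rows after it); alternative decomposition, same cost.

-- ===== PORT A =====
-- s.split(sep) for a non-empty literal sep (split? is some there)
def pvSplit (s sep : String) : List String := (PySem.Str.split? s sep).getD []

-- cells = [cell.strip() for cell in line.split('  ') if cell.strip()]  (the identical comprehension appears in both Pythons)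
def pvCells (line : String) : List String :=
  ((pvSplit line "  ").filter (fun c => PySem.Str.strip c ≠ "")).map PySem.Str.strip

-- one iteration of A's loop over lines; state = (table_data, headers)
def pvStepA (st : List (List String) × Option (List String)) (line : String) :
    List (List String) × Option (List String) :=
  let cells := pvCells line
  if cells = [] then st
  else
    match st.2 with
    | none => if 4 ≤ cells.length then (st.1 ++ [cells], some cells) else st
    | some headers =>
        if headers.length - 1 ≤ cells.length then
          (st.1 ++ [PySem.List.slice cells none (some (headers.length : Int))], some headers)
        else st

def detect_table (text : String) : List (List String) × Option (List String) :=
  (pvSplit text "\n").foldl pvStepA ([], none)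

-- ===== PORT B =====
def detect_table_alt (text : String) : List (List String) × Option (List String) :=
  let parsed : List (List String) := ((pvSplit text "\n").map pvCells).filter (fun c => c ≠ [])
  match parsed.dropWhile (fun c => c.length < 4) with
  | [] => ([], none)
  | h :: t =>
      (h :: (t.filter (fun c => h.length - 1 ≤ c.length)).map (fun c => c.take h.length), some h)

-- ===== PRECONDITION & SPEC =====
def Spec_detect_table (text : String) (out : List (List String) × Option (List String)) : Prop := out = detect_table_alt text
instance (text : String) (out : List (List String) × Option (List String)) : Decidable (Spec_detect_table text out) := by unfold Spec_detect_table; infer_instance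

-- ===== CLAIM (what is proved, stated in full; the proofs are below) =====
def Claim_equal_detect_table : Prop := ∀ (text : String), Dom_detect_table text → Spec_detect_table text (detect_table text)

-- ===== LEMMAS AND PROOFS =====

-- A's loop step, restated on the already-parsed cell list (proof-side helper)
def pvStep' (st : List (List String) × Option (List String)) (cells : List String) :
    List (List String) × Option (List String) :=
  match st.2 with
  | none => if 4 ≤ cells.length then (st.1 ++ [cells], some cells) else st
  | some headers =>
      if headers.length - 1 ≤ cells.length then
        (st.1 ++ [PySem.List.slice cells none (some (headers.length : Int))], some headers)
      else st

-- A's loop skips lines whose cell list is empty: folding over lines = folding over the parsed non-empty cell lists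
theorem foldl_stepA_parsed (lines : List String) (st : List (List String) × Option (List String)) :
    lines.foldl pvStepA st = ((lines.map pvCells).filter (fun c => c ≠ [])).foldl pvStep' st := by
  induction lines generalizing st with
  | nil => rfl
  | cons l ls ih =>
      by_cases h : pvCells l = []
      · simp [pvStepA, h, ih]
      · simp [pvStepA, pvStep', h, ih]

-- phase 2: once headers are fixed, the rest of the fold appends the sufficiently wide rows, truncated
theorem foldl_step_some (ps : List (List String)) (acc : List (List String)) (h : List String) :
    ps.foldl pvStep' (acc, some h) =
      (acc ++ (ps.filter (fun c => h.length - 1 ≤ c.length)).map (fun c => c.take h.length), some h) := by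
  induction ps generalizing acc with
  | nil => simp
  | cons c ps ih =>
      by_cases hc : h.length - 1 ≤ c.length
      · have hc' : h.length ≤ c.length + 1 := by omega
        simp [pvStep', List.foldl_cons, hc, hc', ih,
              PySem.List.slice_to_natCast, List.append_assoc]
      · have hc' : ¬ h.length ≤ c.length + 1 := by omega
        simp [pvStep', List.foldl_cons, hc, hc', ih]

-- phase 1: while no row is wide enough the fold discards rows; the first wide row becomes the header
theorem foldl_step_none (ps : List (List String)) :
    ps.foldl pvStep' ([], none) =
      match ps.dropWhile (fun c => c.length < 4) with
      | [] => ([], none)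
      | h :: t =>
          (h :: (t.filter (fun c => h.length - 1 ≤ c.length)).map (fun c => c.take h.length), some h) := by
  induction ps with
  | nil => rfl
  | cons c ps ih =>
      by_cases hc : 4 ≤ c.length
      · have hdw : (c :: ps).dropWhile (fun c => decide (c.length < 4)) = c :: ps := by
          simp [Nat.not_lt.mpr hc]
        have hs := foldl_step_some ps [c] c
        simp only [List.foldl_cons, hdw]
        simp [pvStep', hc, hs]
      · have hdw : (c :: ps).dropWhile (fun c => decide (c.length < 4)) =
            ps.dropWhile (fun c => decide (c.length < 4)) := by
          simp [Nat.lt_of_not_le hc]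
        simp only [List.foldl_cons, hdw]
        simpa [pvStep', hc] using ih

-- ===== VERDICT (by name: the statement is the Claim_ definition above) =====
theorem detect_table_spec : Claim_equal_detect_table := by
  intro text _
  unfold Spec_detect_table detect_table detect_table_alt
  rw [foldl_stepA_parsed, foldl_step_none]
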